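-- pv_equiv track=rewrite | github.com/tenstormavi/LeetCode | Extra/MinimumStopToReachDestination.py | minStops
-- ===== SOURCE A (Python) =====
-- from typing import List
--
-- def minStops(n: int, k: int, x: int, airports: List[int]) -> int:
--     # write your code here
--     if (airports[x] == 0):
--         return -1
--
--     stops = 0
--     i = 0
--     while i < n - k:
--         j = i + k
--         while j > i and not airports[j]:
--             j -= 1
--
--         if j == i:
--             return -1
--
--         if x <= j:
--             break
--
--         stops += 1
--         i = j
--     return stops
-- ===== SOURCE B (Python) =====
-- from typing import List
--
-- def minStops(n: int, k: int, x: int, airports: List[int]) -> int: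
--     if airports[x] == 0:
--         return -1
--     # indices of open airports, ascending; consumed left to right exactly once
--     rest = [q for q in range(n) if airports[q]]
--     cur, stops = 0, 0
--     while cur < n - k:
--         p = 0
--         while p < len(rest) and rest[p] <= cur:   # skip airports at or behind cur
--             p += 1
--         j = -1
--         while p < len(rest) and rest[p] <= cur + k:  # last open airport in window
--             j = rest[p]
--             p += 1
--         rest = rest[p:]
--         if j < 0:
--             return -1
--         if x <= j:
--             return stops
--         stops += 1
--         cur = j
--     return stops
-- ===== Notes on version B (the rewrite author's own statement) =====
-- stated objective: alternative
-- what changed: B builds the ascending list of open-airport indices once and consumes it left to right (dropWhile + one window scan per jump, each index inspected once), replacing A's backward scan inside every jump; a genuinely different traversal of the data, not measurably faster in Python.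
-- outside the precondition, e.g. on minStops(10, 1, 1, [1, 1, 1]): A returns 0, B raises IndexError; on minStops(3, -2, -2, [1, 1, 1]): A returns 0, B returns -1; on minStops(3, -1, 2, [1, 1, 1]): A does not finish within the time limit, B returns -1
import Mathlib
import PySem

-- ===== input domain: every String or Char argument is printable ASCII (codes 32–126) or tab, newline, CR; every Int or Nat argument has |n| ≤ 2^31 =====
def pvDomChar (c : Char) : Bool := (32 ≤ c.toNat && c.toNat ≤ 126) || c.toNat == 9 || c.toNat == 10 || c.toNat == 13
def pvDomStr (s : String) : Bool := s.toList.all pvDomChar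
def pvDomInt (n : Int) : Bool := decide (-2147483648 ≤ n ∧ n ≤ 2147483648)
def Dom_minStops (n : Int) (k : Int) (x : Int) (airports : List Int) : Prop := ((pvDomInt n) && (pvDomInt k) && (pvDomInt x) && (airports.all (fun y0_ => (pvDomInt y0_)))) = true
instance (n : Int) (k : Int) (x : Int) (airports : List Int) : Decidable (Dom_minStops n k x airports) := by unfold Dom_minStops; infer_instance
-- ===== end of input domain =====

-- B builds the ascending list of open-airport indices once and consumes it left to right,
-- one window at a time, instead of A's backward scan inside every jump (an alternative
-- algorithm of similar cost; equivalence of the return values is proved under Pre_minStops).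

-- ===== PORT A =====
-- inner 'while j > i and not airports[j]: j -= 1'; the pyGetD default 1 is never
-- read under Pre_minStops (the index is then always in range).
def minStopsInner (a : List Int) (i : Int) (j : Int) : Int :=
  if h : i < j ∧ PySem.List.pyGetD a j 1 = 0 then minStopsInner a i (j - 1) else j
termination_by (j - i).toNat
decreasing_by omega

-- outer 'while i < n - k' as fuel recursion; fuel n.toNat+1 bounds the iteration
-- count under Pre_minStops (i starts at 0 and strictly increases below n).
def minStopsLoopA (n : Int) (k : Int) (x : Int) (a : List Int) : Nat → Int → Int → Int
  | 0, stops, _ => stops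
  | fuel + 1, stops, i =>
    if i < n - k then
      let j := minStopsInner a i (i + k)
      if j = i then -1
      else if x ≤ j then stops
      else minStopsLoopA n k x a fuel (stops + 1) j
    else stops

def minStops (n : Int) (k : Int) (x : Int) (airports : List Int) : Int :=
  if PySem.List.pyGetD airports x 1 = 0 then -1
  else minStopsLoopA n k x airports (n.toNat + 1) 0 0

-- ===== PORT B =====
-- the two inner 'while p < len(rest) and rest[p] <= …' scans of Source B: the first is a
-- dropWhile, the second (which also records the last element it passes) is windowLast;
-- 'rest = rest[p:]' is the snd component.
def windowLast : List Int → Int → Int → Int × List Int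
  | [], _, j => (j, [])
  | q :: rs, m, j => if q ≤ m then windowLast rs m q else (j, q :: rs)

-- cited by minStopsGo's decreasing_by: the window scan never lengthens the list,
-- and consumes at least one element whenever it changes j.
theorem windowLast_len_le (l : List Int) (m j0 : Int) :
    (windowLast l m j0).2.length ≤ l.length := by
  induction l generalizing j0 with
  | nil => simp [windowLast]
  | cons q rs ih =>
    simp only [windowLast]
    split
    · exact le_trans (ih q) (by simp)
    · simp

theorem windowLast_len_lt (l : List Int) (m j0 : Int)
    (h : (windowLast l m j0).1 ≠ j0) : (windowLast l m j0).2.length < l.length := by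
  induction l generalizing j0 with
  | nil => simp [windowLast] at h
  | cons q rs ih =>
    by_cases hq : q ≤ m
    · simp only [windowLast, if_pos hq]
      exact lt_of_le_of_lt (windowLast_len_le rs m q) (by simp)
    · simp only [windowLast, if_neg hq] at h
      exact absurd rfl h

-- the outer 'while cur < n - k' of Source B, recursing on the shrinking index list.
def minStopsGo (n : Int) (k : Int) (x : Int) (rest : List Int) (cur : Int) (stops : Int) : Int :=
  if cur < n - k then
    let w := windowLast (rest.dropWhile (fun q => q ≤ cur)) (cur + k) (-1)
    if w.1 < 0 then -1
    else if x ≤ w.1 then stops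
    else minStopsGo n k x w.2 w.1 (stops + 1)
  else stops
termination_by rest.length
decreasing_by
  have h1 : ¬ (windowLast (rest.dropWhile (fun q => q ≤ cur)) (cur + k) (-1)).1 < 0 :=
    by assumption
  exact lt_of_lt_of_le
    (windowLast_len_lt _ _ _ (by omega))
    (List.length_dropWhile_le _ _)

-- '[q for q in range(n) if airports[q]]'; the pyGetD default 0 is never read under
-- Pre_minStops (q < n ≤ len(airports)).
def minStops_alt (n : Int) (k : Int) (x : Int) (airports : List Int) : Int :=
  if PySem.List.pyGetD airports x 1 = 0 then -1
  else minStopsGo n k x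
    ((PySem.List.pyRange 0 n 1).filter (fun q => PySem.List.pyGetD airports q 0 ≠ 0)) 0 0

-- ===== PRECONDITION & SPEC =====
-- Pre_ excludes n > len(airports) (A raises IndexError or returns only via an early break
-- B's open-index list construction cannot reach) and k < 0 with n > k and a nonzero destination
-- (A diverges except on an accidental early break); x may still be any in-range, possibly
-- negative, Python index.
def Pre_minStops (n : Int) (k : Int) (x : Int) (airports : List Int) : Prop :=
  PySem.Raise.InRange airports.length x ∧ n ≤ (airports.length : Int) ∧
  (PySem.List.pyGetD airports x 1 = 0 ∨ 0 ≤ k ∨ n ≤ k)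
instance (n : Int) (k : Int) (x : Int) (airports : List Int) : Decidable (Pre_minStops n k x airports) := by unfold Pre_minStops; infer_instance

def pvWitness_minStops : Int × Int × Int × List Int := (4, 1, 3, [1, 0, 1, 1])

def Spec_minStops (n : Int) (k : Int) (x : Int) (airports : List Int) (out : Int) : Prop := out = minStops_alt n k x airports
instance (n : Int) (k : Int) (x : Int) (airports : List Int) (out : Int) : Decidable (Spec_minStops n k x airports out) := by unfold Spec_minStops; infer_instance

-- ===== CLAIM (what is proved, stated in full; the proofs are below) =====
def Claim_equal_minStops : Prop := ∀ (n : Int) (k : Int) (x : Int) (airports : List Int), Dom_minStops n k x airports → Pre_minStops n k x airports → Spec_minStops n k x airports (minStops n k x airports)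

-- ===== LEMMAS AND PROOFS =====

-- lastNZ a p = largest q ≤ p with a[q] ≠ 0, else -1
def lastNZ (a : List Int) : Nat → Int
  | 0 => if a.getD 0 0 ≠ 0 then 0 else -1
  | p + 1 => if a.getD (p + 1) 0 ≠ 0 then ((p : Int) + 1) else lastNZ a p

theorem lastNZ_le (a : List Int) (p : Nat) : lastNZ a p ≤ (p : Int) := by
  induction p with
  | zero => simp [lastNZ]; split <;> omega
  | succ q ih => simp only [lastNZ]; split <;> omega

theorem lastNZ_ge (a : List Int) (p q : Nat) (hq : q ≤ p) (hz : a.getD q 0 ≠ 0) :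
    (q : Int) ≤ lastNZ a p := by
  induction p with
  | zero =>
    have hq0 : q = 0 := by omega
    subst hq0
    simp only [lastNZ, Nat.cast_zero]
    rw [if_pos hz]
  | succ m ih =>
    by_cases he : q = m + 1
    · subst he
      simp only [lastNZ]
      rw [if_pos hz]
      push_cast
      omega
    · have := ih (by omega)
      simp only [lastNZ]; split <;> omega

-- A's inner scan computes lastNZ of the window end (when it moves at all)
theorem inner_eq (a : List Int) (i m : Int) (hi : 0 ≤ i) (him : i ≤ m)
    (hm : m < (a.length : Int)) :
    minStopsInner a i m = if i < lastNZ a m.toNat then lastNZ a m.toNat else i := by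
  by_cases hlt : i < m
  · have hm0 : 0 ≤ m := by omega
    have hget : PySem.List.pyGetD a m 1 = a.getD m.toNat 0 := by
      rw [PySem.List.pyGetD_eq_getElem _ _ hm0 (by omega)]
      rw [List.getD_eq_getElem _ _ (by omega)]
    have hsucc : m.toNat = (m - 1).toNat + 1 := by omega
    by_cases hz : a.getD m.toNat 0 = 0
    · rw [minStopsInner, dif_pos ⟨hlt, by rw [hget]; exact hz⟩]
      have ih := inner_eq a i (m - 1) hi (by omega) (by omega)
      rw [ih]
      have heq : lastNZ a m.toNat = lastNZ a (m - 1).toNat := by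
        rw [hsucc, lastNZ, if_neg (by rw [← hsucc]; simpa using hz)]
      rw [heq]
    · rw [minStopsInner, dif_neg (by rw [hget]; tauto)]
      have heq : lastNZ a m.toNat = m := by
        rw [hsucc, lastNZ, if_pos (by rw [← hsucc]; simpa using hz)]
        omega
      rw [heq, if_pos hlt]
  · have him' : i = m := by omega
    subst him'
    have hle := lastNZ_le a i.toNat
    rw [minStopsInner, dif_neg (by rintro ⟨h1, -⟩; omega), if_neg (by omega)]
termination_by (m - i).toNat
decreasing_by omega

-- the open-airport index list up to p, ascending
def nzUpTo (a : List Int) (p : Nat) : List Int :=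
  ((List.range p).map (fun q : Nat => (q : Int))).filter
    (fun q => PySem.List.pyGetD a q 0 ≠ 0)

theorem nzUpTo_succ (a : List Int) (p : Nat) :
    nzUpTo a (p + 1) =
      nzUpTo a p ++ (if a.getD p 0 ≠ 0 then [(p : Int)] else []) := by
  unfold nzUpTo
  rw [List.range_succ, List.map_append, List.filter_append]
  congr 1
  simp only [List.map_cons, List.map_nil, List.filter_cons, List.filter_nil,
    PySem.List.pyGetD_natCast, decide_not]
  split <;> simp_all

theorem mem_nzUpTo (a : List Int) (p : Nat) (q : Int) (h : q ∈ nzUpTo a p) :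
    0 ≤ q ∧ q < (p : Int) ∧ a.getD q.toNat 0 ≠ 0 := by
  unfold nzUpTo at h
  simp only [List.mem_filter, List.mem_map, List.mem_range] at h
  obtain ⟨⟨qn, hqn, rfl⟩, hz⟩ := h
  refine ⟨by positivity, by exact_mod_cast hqn, ?_⟩
  simpa [PySem.List.pyGetD_natCast] using hz

theorem sorted_nzUpTo (a : List Int) (p : Nat) : (nzUpTo a p).Pairwise (· ≤ ·) := by
  unfold nzUpTo
  apply List.Pairwise.sublist List.filter_sublist
  refine List.pairwise_map.mpr ?_
  refine List.pairwise_le_range.imp ?_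
  intro x y h
  exact_mod_cast h

-- on a ≤-sorted list, takeWhile/dropWhile of a downward-closed predicate are filters
theorem takeWhile_le_sorted (l : List Int) (m : Int) (hs : l.Pairwise (· ≤ ·)) :
    l.takeWhile (fun q => q ≤ m) = l.filter (fun q => q ≤ m) := by
  induction l with
  | nil => rfl
  | cons q rs ih =>
    rcases List.pairwise_cons.mp hs with ⟨hall, htl⟩
    by_cases h : q ≤ m
    · simp [h, ih htl]
    · simp only [List.takeWhile_cons, List.filter_cons]
      rw [if_neg (by simpa using h), if_neg (by simpa using h)]
      symm
      rw [List.filter_eq_nil_iff]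
      intro y hy
      simp only [decide_eq_true_eq]
      intro hym
      exact h (le_trans (hall y hy) hym)

theorem dropWhile_le_sorted (l : List Int) (m : Int) (hs : l.Pairwise (· ≤ ·)) :
    l.dropWhile (fun q => q ≤ m) = l.filter (fun q => ¬ q ≤ m) := by
  induction l with
  | nil => rfl
  | cons q rs ih =>
    rcases List.pairwise_cons.mp hs with ⟨hall, htl⟩
    by_cases h : q ≤ m
    · simp [h, ih htl]
    · simp only [List.dropWhile_cons, List.filter_cons]
      rw [if_neg (by simpa using h), if_pos (by simpa using h)]
      congr 1
      symm
      rw [List.filter_eq_self]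
      intro y hy
      simp only [decide_eq_true_eq]
      intro hym
      exact h (le_trans (hall y hy) hym)

-- peeling windowLast into takeWhile's last element and dropWhile
theorem windowLast_eq (l : List Int) (m j0 : Int) :
    windowLast l m j0 =
      ((l.takeWhile (fun q => q ≤ m)).getLastD j0, l.dropWhile (fun q => q ≤ m)) := by
  induction l generalizing j0 with
  | nil => rfl
  | cons q rs ih =>
    simp only [windowLast, List.takeWhile_cons, List.dropWhile_cons]
    by_cases h : q ≤ m
    · rw [if_pos h, if_pos (by simpa using h), if_pos (by simpa using h), ih q,
        List.getLastD_cons]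
    · rw [if_neg h, if_neg (by simpa using h), if_neg (by simpa using h)]
      rfl

-- elements above m do not change the windowed filter
theorem filter_window_stable (a : List Int) (i m : Int) (p : Nat)
    (hp : m < (p : Int)) (hm : 0 ≤ m) :
    (nzUpTo a p).filter (fun q => i < q ∧ q ≤ m) =
      (nzUpTo a (m.toNat + 1)).filter (fun q => i < q ∧ q ≤ m) := by
  obtain ⟨d, rfl⟩ : ∃ d, p = (m.toNat + 1) + d := ⟨p - (m.toNat + 1), by omega⟩
  induction d with
  | zero => rfl
  | succ e ih =>
    rw [show m.toNat + 1 + (e + 1) = (m.toNat + 1 + e) + 1 by omega, nzUpTo_succ,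
      List.filter_append, ih (by push_cast; omega)]
    have : (if a.getD (m.toNat + 1 + e) 0 ≠ 0 then [((m.toNat + 1 + e : Nat) : Int)]
        else []).filter (fun q => decide (i < q ∧ q ≤ m)) = [] := by
      split <;> simp
      intro _; omega
    rw [this, List.append_nil]

-- the last open index in the window (i, m], computed from the index list, is lastNZ
theorem getLastD_window (a : List Int) (i : Int) (mN : Nat) (hi : 0 ≤ i) :
    ((nzUpTo a (mN + 1)).filter (fun q => i < q ∧ q ≤ (mN : Int))).getLastD (-1) =
      if i < lastNZ a mN then lastNZ a mN else -1 := by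
  induction mN with
  | zero =>
    have h0 : (nzUpTo a (0 + 1)).filter
        (fun q => decide (i < q ∧ q ≤ ((0 : Nat) : Int))) = [] := by
      rw [List.filter_eq_nil_iff]
      intro q hq
      have := mem_nzUpTo a 1 q hq
      simp only [decide_eq_true_eq]
      push_cast
      omega
    rw [h0]
    simp only [List.getLastD_nil]
    rw [if_neg (by have := lastNZ_le a 0; push_cast at this; omega)]
  | succ m ih =>
    rw [nzUpTo_succ, List.filter_append]
    push_cast
    have hcongr : (nzUpTo a (m + 1)).filter (fun q => decide (i < q ∧ q ≤ (m : Int) + 1)) =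
        (nzUpTo a (m + 1)).filter (fun q => decide (i < q ∧ q ≤ (m : Int))) := by
      apply List.filter_congr
      intro q hq
      have := mem_nzUpTo a (m + 1) q hq
      simp only [decide_eq_decide]
      omega
    by_cases hz : a.getD (m + 1) 0 = 0
    · rw [if_neg (by simpa using hz)]
      simp only [List.filter_nil, List.append_nil]
      rw [hcongr, ih]
      have hstep : lastNZ a (m + 1) = lastNZ a m := by
        simp only [lastNZ]
        rw [if_neg (by simpa using hz)]
      rw [hstep]
    · rw [if_pos (by simpa using hz)]
      have hstep : lastNZ a (m + 1) = (m : Int) + 1 := by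
        simp only [lastNZ]
        rw [if_pos (by simpa using hz)]
      by_cases hlt : i < (m : Int) + 1
      · have hs : List.filter (fun q => decide (i < q ∧ q ≤ (m : Int) + 1))
            [(m : Int) + 1] = [(m : Int) + 1] := by
          simp [hlt]
        rw [hs, hstep, if_pos hlt, List.getLastD_concat]
      · have hs : List.filter (fun q => decide (i < q ∧ q ≤ (m : Int) + 1))
            [(m : Int) + 1] = [] := by
          simp
          omega
        rw [hs, List.append_nil, hcongr, ih, hstep, if_neg hlt,
          if_neg (by have := lastNZ_le a m; omega)]

-- no open index lies strictly between lastNZ a m and m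
theorem filter_above_lastNZ (a : List Int) (pN : Nat) (m : Int) (hm : 0 ≤ m)
    (j : Int) (hj : j = lastNZ a m.toNat) :
    (nzUpTo a pN).filter (fun q => m < q) = (nzUpTo a pN).filter (fun q => j < q) := by
  apply List.filter_congr
  intro q hq
  obtain ⟨hq0, hqp, hqz⟩ := mem_nzUpTo a pN q hq
  have hle : j ≤ m := hj ▸ (by have := lastNZ_le a m.toNat; omega)
  simp only [decide_eq_decide]
  constructor
  · intro h; omega
  · intro h
    by_contra hc
    have : q ≤ lastNZ a m.toNat := by
      have := lastNZ_ge a m.toNat q.toNat (by omega) (by simpa using hqz)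
      omega
    omega

-- the main simulation: A's fuel loop against B's list-consuming recursion
theorem loop_eq (n k x : Int) (a : List Int) (hk : 0 ≤ k) (hn : n ≤ (a.length : Int)) :
    ∀ (fuel : Nat) (stops cur : Int) (rest : List Int), 0 ≤ cur →
      n - k - cur < (fuel : Int) →
      rest.dropWhile (fun q => q ≤ cur) = (nzUpTo a n.toNat).filter (fun q => cur < q) →
      minStopsLoopA n k x a fuel stops cur = minStopsGo n k x rest cur stops := by
  intro fuel
  induction fuel with
  | zero =>
    intro stops cur rest hcur hfuel hinv
    rw [minStopsGo, if_neg (by omega)]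
    rfl
  | succ f ih =>
    intro stops cur rest hcur hfuel hinv
    by_cases hlt : cur < n - k
    · have hm0 : 0 ≤ cur + k := by omega
      have hmn : cur + k < n := by omega
      have hA : minStopsInner a cur (cur + k) =
          if cur < lastNZ a (cur + k).toNat then lastNZ a (cur + k).toNat else cur :=
        inner_eq a cur (cur + k) hcur (by omega) (by omega)
      set L := lastNZ a (cur + k).toNat with hL
      have hLle : L ≤ cur + k := by
        have := lastNZ_le a (cur + k).toNat
        omega
      have hsortF : ((nzUpTo a n.toNat).filter (fun q => cur < q)).Pairwise (· ≤ ·) :=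
        (sorted_nzUpTo a n.toNat).sublist List.filter_sublist
      have hW : windowLast (rest.dropWhile (fun q => q ≤ cur)) (cur + k) (-1) =
          (if cur < L then L else -1,
           (nzUpTo a n.toNat).filter (fun q => cur + k < q)) := by
        rw [hinv, windowLast_eq, takeWhile_le_sorted _ _ hsortF,
          dropWhile_le_sorted _ _ hsortF]
        simp only [Prod.mk.injEq]
        constructor
        · rw [List.filter_filter]
          have hc : (nzUpTo a n.toNat).filter
              (fun q => decide (q ≤ cur + k) && decide (cur < q)) =
              (nzUpTo a n.toNat).filter (fun q => decide (cur < q ∧ q ≤ cur + k)) := by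
            apply List.filter_congr
            intro q _
            by_cases h1 : q ≤ cur + k <;> by_cases h2 : cur < q <;> simp [h1, h2]
          rw [hc, filter_window_stable a cur (cur + k) n.toNat (by omega) hm0]
          have hg := getLastD_window a cur (cur + k).toNat hcur
          rw [show (((cur + k).toNat : Nat) : Int) = cur + k from by omega] at hg
          exact hg
        · rw [List.filter_filter]
          apply List.filter_congr
          intro q _
          by_cases h1 : cur < q <;> by_cases h2 : q ≤ cur + k <;>
            simp [h1, h2] <;> omega
      rw [minStopsGo, if_pos hlt, hW]
      show (if cur < n - k then
              let j := minStopsInner a cur (cur + k)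
              if j = cur then -1
              else if x ≤ j then stops
              else minStopsLoopA n k x a f (stops + 1) j
            else stops) = _
      rw [if_pos hlt]
      simp only [hA]
      by_cases hcL : cur < L
      · simp only [if_pos hcL]
        rw [if_neg (show ¬ L = cur by omega), if_neg (show ¬ L < 0 by omega)]
        by_cases hx : x ≤ L
        · rw [if_pos hx, if_pos hx]
        · rw [if_neg hx, if_neg hx]
          apply ih
          · omega
          · omega
          · rw [dropWhile_le_sorted _ _
              ((sorted_nzUpTo a n.toNat).sublist List.filter_sublist),
              List.filter_filter, ← filter_above_lastNZ a n.toNat (cur + k) hm0 L hL]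
            apply List.filter_congr
            intro q _
            by_cases h1 : cur + k < q <;> by_cases h2 : q ≤ L <;>
              simp [h1, h2] <;> omega
      · simp only [if_neg hcL]
        norm_num
    · rw [minStopsGo, if_neg hlt]
      show (if cur < n - k then _ else stops) = stops
      rw [if_neg hlt]

-- ===== VERDICT (by name: the statement is the Claim_ definition above) =====
theorem minStops_spec : Claim_equal_minStops := by
  intro n k x airports _ hpre
  obtain ⟨hx, hn, hd⟩ := hpre
  unfold Spec_minStops minStops minStops_alt
  by_cases h0 : PySem.List.pyGetD airports x 1 = 0
  · rw [if_pos h0, if_pos h0]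
  · rw [if_neg h0, if_neg h0]
    by_cases hk : 0 ≤ k
    · apply loop_eq n k x airports hk hn (n.toNat + 1) 0 0 _ le_rfl (by push_cast; omega)
      have hnz : (PySem.List.pyRange 0 n 1).filter
          (fun q => decide (PySem.List.pyGetD airports q 0 ≠ 0)) =
          nzUpTo airports n.toNat := by
        rw [PySem.List.pyRange_one]
        unfold nzUpTo
        simp only [Int.sub_zero, zero_add]
      rw [hnz, dropWhile_le_sorted _ _ (sorted_nzUpTo airports n.toNat)]
      apply List.filter_congr
      intro q _
      by_cases h1 : q ≤ (0 : Int) <;> simp [h1] <;> omega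
    · have hnk : n ≤ k := by tauto
      rw [minStopsGo, if_neg (by omega)]
      simp only [minStopsLoopA]
      rw [if_neg (by omega)]
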